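-- pv_equiv track=rewrite | github.com/chrisjd20/moonsimdata | character_wide_cards/generate_missing_abilities.py | extract_new_ability_blocks
-- ===== SOURCE A (Python) =====
-- from typing import List, Dict, Any, Set, Tuple
--
-- SENTINEL_NO_NEW = "# NO NEW ABILITIES"
--
-- def extract_new_ability_blocks(raw_text: str, existing_names: Set[str]) -> Dict[str, str]:
--     """Return mapping of ability name -> YAML block text for new abilities."""
--     if raw_text.strip().startswith(SENTINEL_NO_NEW):
--         return {}
--     # Split by top-level ability name lines (start of line, no leading space, word chars / punctuation, colon)
--     lines = raw_text.splitlines()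
--     blocks: Dict[str, List[str]] = {}
--     current_name = None
--     for line in lines:
--         if line and not line.startswith(' ') and line.endswith(':'):
--             name = line[:-1]
--             current_name = name
--             blocks[current_name] = [line]
--         else:
--             if current_name:
--                 blocks[current_name].append(line)
--     # Join and filter out existing names
--     result: Dict[str, str] = {}
--     for name, blines in blocks.items():
--         if name in existing_names:
--             continue
--         result[name] = "\n".join(blines).rstrip() + "\n"
--     return result
-- ===== SOURCE B (Python) =====
-- SENTINEL_NO_NEW = "# NO NEW ABILITIES"
--
-- def _is_header(line):
--     return bool(line) and not line.startswith(' ') and line.endswith(':')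
--
-- def extract_new_ability_blocks(raw_text, existing_names):
--     """Two-pointer block scan: slice each header-delimited block whole and
--     build the filtered result directly in one pass."""
--     if raw_text.strip().startswith(SENTINEL_NO_NEW):
--         return {}
--     lines = raw_text.splitlines()
--     n = len(lines)
--     result = {}
--     i = 0
--     while i < n:
--         if not _is_header(lines[i]):
--             i += 1
--             continue
--         j = i + 1
--         while j < n and not _is_header(lines[j]):
--             j += 1
--         name = lines[i][:-1]
--         if name not in existing_names:
--             result[name] = "\n".join(lines[i:j]).rstrip() + "\n"
--         i = j
--     return result
-- ===== Notes on version B (the rewrite author's own statement) =====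
-- stated objective: alternative
-- what changed: B replaces A's line-by-line state machine (a dict of mutable line-lists driven by a current_name pointer, followed by a second join-and-filter pass over the dict) with a single two-pointer scan that finds each header, slices the whole header-delimited block at once, and builds the filtered result directly.
-- intended difference: On inputs whose last bare ':' line (a top-level header with empty name) is followed by a non-blank line before the next header, A's truthiness test 'if current_name:' silently drops the block body and returns ':\n' for the '' entry, while B keeps the body in the block, which is the intended grouping. — e.g. on extract_new_ability_blocks(":\nx", []): A returns [("", ":\n")], B returns [("", ":\nx\n")]
import Mathlib
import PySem

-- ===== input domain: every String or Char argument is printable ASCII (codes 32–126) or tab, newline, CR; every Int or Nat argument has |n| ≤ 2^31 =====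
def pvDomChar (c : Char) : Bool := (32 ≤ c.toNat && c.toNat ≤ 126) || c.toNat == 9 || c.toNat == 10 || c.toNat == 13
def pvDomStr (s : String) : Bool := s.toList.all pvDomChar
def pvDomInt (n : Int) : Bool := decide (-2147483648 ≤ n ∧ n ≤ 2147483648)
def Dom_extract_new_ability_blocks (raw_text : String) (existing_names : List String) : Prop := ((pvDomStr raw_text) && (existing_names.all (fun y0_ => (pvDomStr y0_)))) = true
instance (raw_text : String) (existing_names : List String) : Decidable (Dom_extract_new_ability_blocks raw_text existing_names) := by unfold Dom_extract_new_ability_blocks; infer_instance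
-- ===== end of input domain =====

-- B replaces A's line-by-line state machine (dict of line-lists + current-name pointer + second
-- filtering pass) by a single two-pointer scan that slices each header-delimited block whole and
-- builds the filtered result directly; on blocks headed by a bare ":" line B keeps the block's body
-- where A's truthiness test drops it (see D_ below). Objective: alternative (same O(n) cost).

-- shared helper: the header-line test `line and not line.startswith(' ') and line.endswith(':')`
def pvIsHeader (l : String) : Bool :=
  (!(l == "")) && (!(PySem.Str.startswith l " ")) && PySem.Str.endswith l ":"

-- line[:-1]
def pvName (l : String) : String := PySem.Str.slice l none (some (-1))

-- ===== PORT A =====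
def extract_new_ability_blocks (raw_text : String) (existing_names : List String) : List (String × String) :=
  if PySem.Str.startswith (PySem.Str.strip raw_text) "# NO NEW ABILITIES" then []
  else
    let lines := PySem.Str.splitlines raw_text
    -- state: (blocks, current_name); Python's `if current_name:` is falsy for None and ""
    let st := lines.foldl
      (fun (s : PySem.Dict String (List String) × Option String) line =>
        if pvIsHeader line then
          let name := pvName line
          (s.1.insert name [line], some name)
        else
          match s.2 with
          | some cur =>
              if cur == "" then s
              -- blocks[current_name].append(line): key is always present here, so modify is exact
              else (s.1.modify cur [] (fun b => b ++ [line]), s.2)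
          | none => s)
      (PySem.Dict.empty, none)
    let result := st.1.items.foldl
      (fun (r : PySem.Dict String String) p =>
        if PySem.Set.contains existing_names p.1 then r
        else r.insert p.1 (PySem.Str.rstrip (PySem.Str.join "\n" p.2) ++ "\n"))
      PySem.Dict.empty
    result.items

-- ===== PORT B =====
-- the two-pointer while-loop of Source B: skip to the next header, scan its body (j-scan =
-- takeWhile/dropWhile on the remaining lines), slice the block whole, insert if new
def pvScanB (existing_names : List String) : List String → PySem.Dict String String → PySem.Dict String String
  | [], r => r
  | l :: ls, r =>
    if pvIsHeader l then
      let body := ls.takeWhile (fun x => !pvIsHeader x)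
      let rest := ls.dropWhile (fun x => !pvIsHeader x)
      let name := pvName l
      pvScanB existing_names rest
        (if PySem.Set.contains existing_names name then r
         else r.insert name (PySem.Str.rstrip (PySem.Str.join "\n" (l :: body)) ++ "\n"))
    else pvScanB existing_names ls r
  termination_by ls _ => ls.length
  decreasing_by
  · exact Nat.lt_succ_of_le (List.length_dropWhile_le _ _)
  · exact Nat.lt_succ_self _

def extract_new_ability_blocks_alt (raw_text : String) (existing_names : List String) : List (String × String) :=
  if PySem.Str.startswith (PySem.Str.strip raw_text) "# NO NEW ABILITIES" then []
  else (pvScanB existing_names (PySem.Str.splitlines raw_text) PySem.Dict.empty).items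

-- ===== PRECONDITION & SPEC =====
-- On inputs whose last bare ":" line (a top-level header with empty name) is followed by a
-- non-blank body line, A's truthiness test `if current_name:` silently drops the body and maps
-- "" to ":\n", while B keeps the body in the block, which is the intended grouping.
def D_extract_new_ability_blocks (raw_text : String) (existing_names : List String) : Prop :=
  PySem.Str.startswith (PySem.Str.strip raw_text) "# NO NEW ABILITIES" = false ∧
  "" ∉ existing_names ∧
  ∃ i ∈ List.range (PySem.Str.splitlines raw_text).length,
    ((PySem.Str.splitlines raw_text).drop i).head? = some ":" ∧
    ":" ∉ (PySem.Str.splitlines raw_text).drop (i + 1) ∧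
    ∃ x ∈ ((PySem.Str.splitlines raw_text).drop (i + 1)).takeWhile (fun y => !pvIsHeader y),
      x.toList.any (fun c => !PySem.Chars.isspace c) = true

instance (raw_text : String) (existing_names : List String) : Decidable (D_extract_new_ability_blocks raw_text existing_names) := by
  unfold D_extract_new_ability_blocks; infer_instance

def Spec_extract_new_ability_blocks (raw_text : String) (existing_names : List String) (out : List (String × String)) : Prop :=
  ¬ D_extract_new_ability_blocks raw_text existing_names → out = extract_new_ability_blocks_alt raw_text existing_names
instance (raw_text : String) (existing_names : List String) (out : List (String × String)) : Decidable (Spec_extract_new_ability_blocks raw_text existing_names out) := by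
  unfold Spec_extract_new_ability_blocks; infer_instance

def pvDiffWitness_extract_new_ability_blocks : String × List String := (":\nx", [])
def pvDiffWitnessOut_extract_new_ability_blocks : (List (String × String)) × (List (String × String)) :=
  ([("", ":\n")], [("", ":\nx\n")])

-- ===== CLAIM (what is proved, stated in full; the proofs are below) =====
def Claim_unchanged_extract_new_ability_blocks : Prop := ∀ (raw_text : String) (existing_names : List String), Dom_extract_new_ability_blocks raw_text existing_names → Spec_extract_new_ability_blocks raw_text existing_names (extract_new_ability_blocks raw_text existing_names)
def Claim_exact_extract_new_ability_blocks : Prop := ∀ (raw_text : String) (existing_names : List String), Dom_extract_new_ability_blocks raw_text existing_names → D_extract_new_ability_blocks raw_text existing_names → extract_new_ability_blocks raw_text existing_names ≠ extract_new_ability_blocks_alt raw_text existing_names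
def Claim_changed_extract_new_ability_blocks : Prop := Dom_extract_new_ability_blocks (pvDiffWitness_extract_new_ability_blocks.1) (pvDiffWitness_extract_new_ability_blocks.2) ∧ D_extract_new_ability_blocks (pvDiffWitness_extract_new_ability_blocks.1) (pvDiffWitness_extract_new_ability_blocks.2) ∧ extract_new_ability_blocks (pvDiffWitness_extract_new_ability_blocks.1) (pvDiffWitness_extract_new_ability_blocks.2) = pvDiffWitnessOut_extract_new_ability_blocks.1 ∧ extract_new_ability_blocks_alt (pvDiffWitness_extract_new_ability_blocks.1) (pvDiffWitness_extract_new_ability_blocks.2) = pvDiffWitnessOut_extract_new_ability_blocks.2 ∧ pvDiffWitnessOut_extract_new_ability_blocks.1 ≠ pvDiffWitnessOut_extract_new_ability_blocks.2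

-- ===== LEMMAS AND PROOFS =====


-- ---------- proof-only helpers ----------

-- the non-header test
def pvNH (x : String) : Bool := !pvIsHeader x

-- block structure of a line list: (name, whole block) for each header-delimited block
def pvChunks : List String → List (String × List String)
  | [] => []
  | l :: ls =>
    if pvIsHeader l then
      (pvName l, l :: ls.takeWhile pvNH) :: pvChunks (ls.dropWhile pvNH)
    else pvChunks ls
  termination_by ls => ls.length
  decreasing_by
  · exact Nat.lt_succ_of_le (List.length_dropWhile_le _ _)
  · exact Nat.lt_succ_self _

-- the block value both programs store
def pvG (bl : List String) : String := PySem.Str.rstrip (PySem.Str.join "\n" bl) ++ "\n"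

-- what A's first pass stores for a chunk
def pvFA (p : String × List String) : List String := if p.1 = "" then [":"] else p.2

-- the filtered-insert step both final results are folds of
def pvStep (ex : List String) (r : PySem.Dict String String) (q : String × String) : PySem.Dict String String :=
  if PySem.Set.contains ex q.1 then r else r.insert q.1 q.2

-- A's fold step
def pvStepA (s : PySem.Dict String (List String) × Option String) (line : String) :
    PySem.Dict String (List String) × Option String :=
  if pvIsHeader line then
    (s.1.insert (pvName line) [line], some (pvName line))
  else
    match s.2 with
    | some cur => if cur == "" then s else (s.1.modify cur [] (fun b => b ++ [line]), s.2)
    | none => s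

-- A's second pass
def pvPass2 (ex : List String) (d : PySem.Dict String (List String)) : PySem.Dict String String :=
  d.items.foldl
    (fun r q => if PySem.Set.contains ex q.1 then r else r.insert q.1 (pvG q.2)) PySem.Dict.empty

def pvRelP (a b : String × String) : Prop := a.1 = b.1 ∧ (a.1 ≠ "" → a.2 = b.2)

def pvRelD (r1 r2 : PySem.Dict String String) : Prop := List.Forall₂ pvRelP r1.items r2.items

-- ========== B side ==========

theorem pvScanB_eq_chunks (ex : List String) (L : List String) (r : PySem.Dict String String) :
    pvScanB ex L r = (pvChunks L).foldl (fun r p => pvStep ex r (p.1, pvG p.2)) r := by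
  induction L using pvChunks.induct generalizing r with
  | case1 => rw [pvScanB.eq_def, pvChunks.eq_def]; rfl
  | case2 l ls hh ih =>
      rw [pvScanB.eq_def, pvChunks.eq_def]
      simp only [if_pos hh, List.foldl_cons]
      exact ih _
  | case3 l ls hh ih =>
      rw [pvScanB.eq_def, pvChunks.eq_def]
      simp only [if_neg hh]
      exact ih _

-- ========== A side, pass 1 ==========

theorem pvModify_eq_insert (d : PySem.Dict String (List String)) (n : String)
    (f : List String → List String) : d.modify n [] f = d.insert n (f (d.getD n [])) := by
  simp [PySem.Dict.modify]

theorem pvAbsorbInsert (d : PySem.Dict String (List String)) (n : String) (v : List String)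
    (body : List String) :
    body.foldl (fun d l => d.modify n [] (fun b => b ++ [l])) (d.insert n v) = d.insert n (v ++ body) := by
  induction body generalizing v with
  | nil => simp
  | cons x xs ih =>
      simp only [List.foldl_cons]
      rw [pvModify_eq_insert, PySem.Dict.getD_insert_self, PySem.Dict.insert_insert_self, ih]
      simp

def pvAbsorb (d : PySem.Dict String (List String)) (cur : Option String)
    (pre : List String) : PySem.Dict String (List String) :=
  match cur with
  | none => d
  | some n => if n == "" then d else pre.foldl (fun d l => d.modify n [] (fun b => b ++ [l])) d

theorem pvHeaderEmptyName (l : String) (hh : pvIsHeader l = true) (hn : pvName l = "") :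
    l = ":" := by
  have hend : PySem.Str.endswith l ":" = true := by
    simp only [pvIsHeader, Bool.and_eq_true] at hh
    exact hh.2
  have hsuf : (":").toList <:+ l.toList := by
    rw [← PySem.Chars.endswith_iff]
    simpa using hend
  obtain ⟨t, ht⟩ := hsuf
  have ht' : l.toList = t ++ [':'] := by simpa using ht.symm
  have hnl : (pvName l).toList = t := by
    rw [pvName, PySem.Str.toList_slice, ht']
    show PySem.List.slice (t ++ [':']) none (some (-1)) = t
    simp only [PySem.List.slice, Int.reduceNeg, Order.lt_one_iff, PySem.List.clampIdx_neg_ofNat,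
      tsub_zero, List.drop_zero]
    simp
  rw [hn] at hnl
  have ht0 : t = [] := by simpa using hnl.symm
  have : l.toList = (":").toList := by rw [ht', ht0]; rfl
  exact String.toList_inj.mp this

theorem pvAbsorb_nil (d : PySem.Dict String (List String)) (cur : Option String) :
    pvAbsorb d cur [] = d := by
  cases cur with
  | none => rfl
  | some n => simp only [pvAbsorb]; split <;> rfl

-- folding non-header lines from a header state only absorbs them into the current block
theorem pvFold_nonheaders (body : List String) (d : PySem.Dict String (List String))
    (cur : Option String) (hb : ∀ x ∈ body, pvIsHeader x = false) :
    body.foldl pvStepA (d, cur) = (pvAbsorb d cur body, cur) := by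
  induction body generalizing d with
  | nil => cases cur with
    | none => rfl
    | some n => simp only [pvAbsorb]; split <;> rfl
  | cons x xs ih =>
      have hx : pvIsHeader x = false := hb x (by simp)
      have hxs : ∀ y ∈ xs, pvIsHeader y = false := fun y hy => hb y (by simp [hy])
      cases cur with
      | none => simp only [List.foldl_cons, pvStepA, hx]; exact ih d hxs
      | some n =>
          by_cases hn : n = ""
          · subst hn
            simp only [List.foldl_cons, pvStepA, hx, Bool.false_eq_true, if_false,
              beq_self_eq_true, if_true]
            rw [ih d hxs]
            simp [pvAbsorb]
          · have hnb : (n == "") = false := by simp [hn]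
            simp only [List.foldl_cons, pvStepA, hx, hnb, Bool.false_eq_true, if_false]
            rw [ih _ hxs]
            simp [pvAbsorb, hnb]

theorem pvPass1_gen (L : List String) (d : PySem.Dict String (List String)) (cur : Option String) :
    (L.foldl pvStepA (d, cur)).1 =
      (pvChunks L).foldl (fun d p => d.insert p.1 (pvFA p)) (pvAbsorb d cur (L.takeWhile pvNH)) := by
  induction L using pvChunks.induct generalizing d cur with
  | case1 =>
      simp only [List.foldl_nil, pvChunks, List.takeWhile_nil]
      cases cur with
      | none => rfl
      | some n => simp only [pvAbsorb]; split <;> rfl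
  | case2 l ls hh ih =>
      have hnh : pvNH l = false := by simp [pvNH, hh]
      rw [pvChunks.eq_def]
      simp only [if_pos hh, List.foldl_cons, List.takeWhile_cons, hnh]
      simp only [Bool.false_eq_true, if_false]
      -- LHS: first step is the header step
      have hstep : pvStepA (d, cur) l = (d.insert (pvName l) [l], some (pvName l)) := by
        simp [pvStepA, hh]
      rw [hstep]
      -- split ls into body ++ rest
      have hsplit : ls = ls.takeWhile pvNH ++ ls.dropWhile pvNH := (List.takeWhile_append_dropWhile).symm
      have hbody : ∀ x ∈ ls.takeWhile pvNH, pvIsHeader x = false := by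
        intro x hx
        have := List.mem_takeWhile_imp hx
        simpa [pvNH] using this
      conv_lhs => rw [hsplit]
      rw [List.foldl_append, pvFold_nonheaders _ _ _ hbody, ih]
      -- takeWhile of a dropWhile is empty
      have hdw : (ls.dropWhile pvNH).takeWhile pvNH = [] := by
        cases h : ls.dropWhile pvNH with
        | nil => rfl
        | cons y ys =>
            have hy : pvNH y = false := by
              have := List.head_dropWhile_not pvNH (l := ls) (by simp [h])
              simpa [h] using this
            simp [hy]
      rw [hdw, pvAbsorb_nil, pvAbsorb_nil]
      -- both accumulators agree
      congr 1
      by_cases hn : pvName l = ""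
      · have hl : l = ":" := pvHeaderEmptyName l hh hn
        subst hl
        simp [pvAbsorb, pvFA, hn]
      · have hnb : (pvName l == "") = false := by simp [hn]
        simp only [pvAbsorb, hnb, Bool.false_eq_true, if_false]
        rw [pvAbsorbInsert]
        simp [pvFA, hn]
  | case3 l ls hh ih =>
      have hh' : pvIsHeader l = false := by simpa using hh
      have hnh : pvNH l = true := by simp [pvNH, hh']
      rw [pvChunks.eq_def]
      simp only [if_neg hh, List.takeWhile_cons, hnh, if_true, List.foldl_cons]
      cases cur with
      | none =>
          have : pvStepA (d, none) l = (d, none) := by simp [pvStepA, hh']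
          rw [this, ih]
          rfl
      | some n =>
          by_cases hn : n = ""
          · subst hn
            have : pvStepA (d, some "") l = (d, some "") := by simp [pvStepA, hh']
            rw [this, ih]
            simp [pvAbsorb]
          · have hnb : (n == "") = false := by simp [hn]
            have : pvStepA (d, some n) l = (d.modify n [] (fun b => b ++ [l]), some n) := by
              simp [pvStepA, hh', hnb]
            rw [this, ih]
            simp [pvAbsorb, hnb]

theorem pvPass1_chunks (L : List String) (d : PySem.Dict String (List String)) :
    (L.foldl pvStepA (d, none)).1 = (pvChunks L).foldl (fun d p => d.insert p.1 (pvFA p)) d := by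
  have := pvPass1_gen L d none
  simpa [pvAbsorb] using this

-- ========== pass2 over an insert-fold ==========

theorem pvPass2_go (ex : List String) (l : List (String × List String))
    (r : PySem.Dict String String) (hfr : ∀ q ∈ l, q.1 ∉ r.keys)
    (hnd : (l.map Prod.fst).Nodup) :
    l.foldl (fun r q => if PySem.Set.contains ex q.1 then r else r.insert q.1 (pvG q.2)) r =
      PySem.Dict.mk (r.items ++
        ((l.filter (fun q => !PySem.Set.contains ex q.1)).map (fun q => (q.1, pvG q.2)))) := by
  induction l generalizing r with
  | nil => cases r; simp
  | cons q l ih =>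
      have hcons := List.nodup_cons.mp (by simpa using hnd : (q.1 :: l.map Prod.fst).Nodup)
      have hnd' : (l.map Prod.fst).Nodup := hcons.2
      have hq1ne : ∀ q' ∈ l, q'.1 ≠ q.1 := by
        intro q' hq' he
        exact hcons.1 (List.mem_map.mpr ⟨q', hq', he⟩)
      simp only [List.foldl_cons]
      by_cases hm : PySem.Set.contains ex q.1 = true
      · have hm' : q.1 ∈ ex := by simpa using hm
        rw [if_pos hm, ih _ (fun q' hq' => hfr q' (by simp [hq'])) hnd']
        simp [hm']
      · have hm' : q.1 ∉ ex := by simpa using hm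
        rw [if_neg hm]
        have hq1 : q.1 ∉ r.keys := hfr q (by simp)
        have hcr : r.contains q.1 = false := by
          rcases h : r.contains q.1 with _ | _
          · rfl
          · exact absurd ((PySem.Dict.contains_iff_mem_keys r q.1).mp h) hq1
        have hins : (r.insert q.1 (pvG q.2)).items = r.items ++ [(q.1, pvG q.2)] :=
          PySem.Dict.items_insert_of_not_contains r _ hcr
        have hkeys : (r.insert q.1 (pvG q.2)).keys = r.keys ++ [q.1] := by
          show (r.insert q.1 (pvG q.2)).items.map Prod.fst = _
          rw [hins]
          simp [PySem.Dict.keys]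
        rw [ih _ ?_ hnd']
        · rw [hins, List.filter_cons]
          simp [hm']
        · intro q' hq'
          rw [hkeys]
          simp only [List.mem_append, List.mem_singleton]
          rintro (h | h)
          · exact hfr q' (by simp [hq']) h
          · exact hq1ne q' hq' h

theorem pvPass2_char (ex : List String) (d : PySem.Dict String (List String))
    (hnd : d.keys.Nodup) :
    pvPass2 ex d =
      PySem.Dict.mk (((d.items.filter (fun q => !PySem.Set.contains ex q.1)).map
        (fun q => (q.1, pvG q.2)))) := by
  have h := pvPass2_go ex d.items PySem.Dict.empty (by intro q hq; simp [PySem.Dict.keys_empty]) hnd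
  simpa [pvPass2] using h

theorem pvFilterMapRep (ex : List String) (items : List (String × List String))
    (k : String) (v : List String) :
    (((items.map (fun p => if p.1 == k then (k, v) else p)).filter
        (fun q => !PySem.Set.contains ex q.1)).map (fun q => (q.1, pvG q.2))) =
      if PySem.Set.contains ex k then
        ((items.filter (fun q => !PySem.Set.contains ex q.1)).map (fun q => (q.1, pvG q.2)))
      else
        ((items.filter (fun q => !PySem.Set.contains ex q.1)).map (fun q => (q.1, pvG q.2))).map
          (fun p => if p.1 == k then (k, pvG v) else p) := by
  rw [List.filter_map, List.map_map]
  have hfst : ∀ p : String × List String, ((fun p => if p.1 == k then (k, v) else p) p).1 = p.1 := by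
    intro p
    by_cases h : p.1 = k
    · simp [h]
    · simp [h]
  rw [List.filter_congr (by
    intro p _
    show (!PySem.Set.contains ex ((fun p => if p.1 == k then (k, v) else p) p).1) =
      (!PySem.Set.contains ex p.1)
    rw [hfst])]
  by_cases hm : PySem.Set.contains ex k = true
  · rw [if_pos hm]
    apply List.map_congr_left
    intro p hp
    have hP := (List.mem_filter.mp hp).2
    have hne : p.1 ≠ k := by
      intro he
      rw [he] at hP
      simp at hP
      exact hP (by simpa using hm)
    simp [Function.comp, hne]
  · rw [if_neg hm, List.map_map]
    apply List.map_congr_left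
    intro p _
    by_cases h : p.1 = k
    · simp [Function.comp, h]
    · simp [Function.comp, h]

theorem pvK1 (ex : List String) (d : PySem.Dict String (List String)) (hnd : d.keys.Nodup)
    (k : String) (v : List String) :
    pvPass2 ex (d.insert k v) = pvStep ex (pvPass2 ex d) (k, pvG v) := by
  have hnd' := PySem.Dict.nodup_keys_insert d k v hnd
  rw [pvPass2_char ex _ hnd', pvPass2_char ex d hnd]
  by_cases hc : d.contains k = true
  · rw [PySem.Dict.items_insert, if_pos hc, pvFilterMapRep]
    by_cases hm : PySem.Set.contains ex k = true
    · have hm' : k ∈ ex := by simpa using hm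
      rw [if_pos hm]
      simp [pvStep, hm']
    · have hm' : k ∉ ex := by simpa using hm
      rw [if_neg hm]
      have hkmem : k ∈ ((d.items.filter (fun q => !PySem.Set.contains ex q.1)).map
          (fun q => (q.1, pvG q.2))).map Prod.fst := by
        have : k ∈ d.keys := (PySem.Dict.contains_iff_mem_keys d k).mp hc
        obtain ⟨p, hp, hpk⟩ := List.mem_map.mp this
        refine List.mem_map.mpr ⟨(p.1, pvG p.2), List.mem_map.mpr ⟨p, List.mem_filter.mpr ⟨hp, ?_⟩, rfl⟩, hpk⟩
        simp [hpk, hm']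
      have hcm : (PySem.Dict.mk ((d.items.filter (fun q => !PySem.Set.contains ex q.1)).map
          (fun q => (q.1, pvG q.2)))).contains k = true := by
        rw [PySem.Dict.contains_iff_mem_keys]
        simpa [PySem.Dict.keys] using hkmem
      rw [pvStep, if_neg hm]
      apply PySem.Dict.ext
      rw [PySem.Dict.items_insert, if_pos hcm]
  · rw [PySem.Dict.items_insert, if_neg hc, List.filter_append, List.map_append]
    by_cases hm : PySem.Set.contains ex k = true
    · have hm' : k ∈ ex := by simpa using hm
      rw [pvStep, if_pos hm]
      simp [hm']
    · have hm' : k ∉ ex := by simpa using hm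
      have hknmem : k ∉ ((d.items.filter (fun q => !PySem.Set.contains ex q.1)).map
          (fun q => (q.1, pvG q.2))).map Prod.fst := by
        intro hmem
        obtain ⟨q', hq', hqk⟩ := List.mem_map.mp hmem
        obtain ⟨p, hp, hpeq⟩ := List.mem_map.mp hq'
        have : p.1 = k := by rw [← hpeq] at hqk; simpa using hqk
        have hk : k ∈ d.keys := List.mem_map.mpr ⟨p, (List.mem_filter.mp hp).1, this⟩
        rw [← PySem.Dict.contains_iff_mem_keys] at hk
        simp [hc] at hk
      have hcm : (PySem.Dict.mk ((d.items.filter (fun q => !PySem.Set.contains ex q.1)).map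
          (fun q => (q.1, pvG q.2)))).contains k = false := by
        rcases h : PySem.Dict.contains _ k with _ | _
        · rfl
        · exfalso
          apply hknmem
          have := (PySem.Dict.contains_iff_mem_keys _ k).mp h
          simpa [PySem.Dict.keys] using this
      rw [pvStep, if_neg hm]
      apply PySem.Dict.ext
      rw [PySem.Dict.items_insert_of_not_contains _ _ hcm]
      simp [hm']

theorem pvK (ex : List String) (l : List (String × List String)) (d : PySem.Dict String (List String))
    (hnd : d.keys.Nodup) :
    pvPass2 ex (l.foldl (fun d q => d.insert q.1 q.2) d) =
      l.foldl (fun r q => pvStep ex r (q.1, pvG q.2)) (pvPass2 ex d) := by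
  induction l generalizing d with
  | nil => rfl
  | cons q l ih =>
      simp only [List.foldl_cons]
      rw [ih _ (PySem.Dict.nodup_keys_insert d q.1 q.2 hnd), pvK1 ex d hnd]

-- ========== the rel machinery ==========

theorem pvF2_map {α β γ δ : Type} {R : α → β → Prop} {S : γ → δ → Prop} {l1 : List α}
    {l2 : List β} (h : List.Forall₂ R l1 l2) (f : α → γ) (g : β → δ)
    (hfg : ∀ x y, R x y → S (f x) (g y)) : List.Forall₂ S (l1.map f) (l2.map g) := by
  induction h with
  | nil => simp
  | cons hxy _ ih => simp only [List.map_cons]; exact List.Forall₂.cons (hfg _ _ hxy) ih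

theorem pvF2_app {α β : Type} {R : α → β → Prop} {l1 m1 : List α} {l2 m2 : List β}
    (h1 : List.Forall₂ R l1 l2) (h2 : List.Forall₂ R m1 m2) :
    List.Forall₂ R (l1 ++ m1) (l2 ++ m2) := by
  induction h1 with
  | nil => simpa
  | cons hxy _ ih => simpa using List.Forall₂.cons hxy ih

theorem pvF2_eq {α : Type} {l1 l2 : List α} (h : List.Forall₂ Eq l1 l2) : l1 = l2 := by
  induction h with
  | nil => rfl
  | cons hxy _ ih => rw [hxy, ih]

theorem pvRel_keys {r1 r2 : PySem.Dict String String} (hr : pvRelD r1 r2) :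
    r1.keys = r2.keys := by
  simp only [PySem.Dict.keys]
  exact pvF2_eq (pvF2_map hr Prod.fst Prod.fst (fun x y hxy => hxy.1))

theorem pvRel_eq_of_no_empty {l1 l2 : List (String × String)} (h : List.Forall₂ pvRelP l1 l2)
    (hne : ∀ p ∈ l1, p.1 ≠ "") : l1 = l2 := by
  induction h with
  | nil => rfl
  | cons hxy h ih =>
      rename_i a b l1' l2'
      have ha : a.1 ≠ "" := hne a (by simp)
      have : a = b := Prod.ext hxy.1 (hxy.2 ha)
      rw [this, ih (fun p hp => hne p (by simp [hp]))]

theorem pvRel_step (ex : List String) {a b : String × String} {r1 r2 : PySem.Dict String String}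
    (hab : pvRelP a b) (hr : pvRelD r1 r2) : pvRelD (pvStep ex r1 a) (pvStep ex r2 b) := by
  obtain ⟨hk, hv⟩ := hab
  by_cases hm : PySem.Set.contains ex a.1 = true
  · simp only [pvStep, hm, ← hk, if_true]
    exact hr
  · have hmB : ¬ PySem.Set.contains ex b.1 = true := by rw [← hk]; exact hm
    rw [pvStep, pvStep, if_neg hm, if_neg hmB]
    have hck : r1.contains a.1 = r2.contains b.1 := by
      rw [← hk]
      rcases h1 : r1.contains a.1 with _ | _ <;> rcases h2 : r2.contains a.1 with _ | _
      · rfl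
      · exact absurd ((PySem.Dict.contains_iff_mem_keys r2 a.1).mp h2)
          (by rw [← pvRel_keys hr]; intro hmem
              exact (Bool.eq_false_iff.mp h1) ((PySem.Dict.contains_iff_mem_keys r1 a.1).mpr hmem))
      · exact absurd ((PySem.Dict.contains_iff_mem_keys r1 a.1).mp h1)
          (by rw [pvRel_keys hr]; intro hmem
              exact (Bool.eq_false_iff.mp h2) ((PySem.Dict.contains_iff_mem_keys r2 a.1).mpr hmem))
      · rfl
    unfold pvRelD
    by_cases hc : r1.contains a.1 = true
    · rw [PySem.Dict.items_insert, PySem.Dict.items_insert, if_pos hc, if_pos (by rw [← hck]; exact hc)]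
      refine pvF2_map hr _ _ ?_
      intro x y hxy
      by_cases hx : x.1 = a.1
      · have hy : (y.1 == b.1) = true := by simp [← hxy.1, ← hk, hx]
        rw [if_pos (by simp [hx]), if_pos hy]
        exact ⟨hk, fun h => hv h⟩
      · have hy : (y.1 == b.1) = false := by simp [← hxy.1, ← hk]; exact hx
        rw [if_neg (by simp [hx]), if_neg (by simp at hy ⊢; exact hy)]
        exact hxy
    · rw [PySem.Dict.items_insert, PySem.Dict.items_insert, if_neg hc, if_neg (by rw [← hck]; exact hc)]
      exact pvF2_app hr (List.Forall₂.cons ⟨hk, fun h => hv h⟩ (List.Forall₂.nil))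

theorem pvRel_fold (ex : List String) {l1 l2 : List (String × String)}
    {r1 r2 : PySem.Dict String String} (hl : List.Forall₂ pvRelP l1 l2) (hr : pvRelD r1 r2) :
    pvRelD (l1.foldl (pvStep ex) r1) (l2.foldl (pvStep ex) r2) := by
  induction hl generalizing r1 r2 with
  | nil => exact hr
  | cons hxy _ ih => exact ih (pvRel_step ex hxy hr)

theorem pvRel_insert_empty {r1 r2 : PySem.Dict String String} (hr : pvRelD r1 r2)
    (v : String) : r1.insert "" v = r2.insert "" v := by
  apply PySem.Dict.ext
  have hck : r1.contains "" = r2.contains "" := by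
    rcases h1 : r1.contains "" with _ | _ <;> rcases h2 : r2.contains "" with _ | _
    · rfl
    · exact absurd ((PySem.Dict.contains_iff_mem_keys r2 "").mp h2)
        (by rw [← pvRel_keys hr]; intro hmem
            exact (Bool.eq_false_iff.mp h1) ((PySem.Dict.contains_iff_mem_keys r1 "").mpr hmem))
    · exact absurd ((PySem.Dict.contains_iff_mem_keys r1 "").mp h1)
        (by rw [pvRel_keys hr]; intro hmem
            exact (Bool.eq_false_iff.mp h2) ((PySem.Dict.contains_iff_mem_keys r2 "").mpr hmem))
    · rfl
  by_cases hc : r1.contains "" = true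
  · rw [PySem.Dict.items_insert, PySem.Dict.items_insert, if_pos hc, if_pos (hck ▸ hc)]
    refine pvF2_eq (pvF2_map hr _ _ ?_)
    intro x y hxy
    by_cases hx : x.1 = ""
    · rw [if_pos (by simp [hx]), if_pos (by simp [← hxy.1, hx])]
    · rw [if_neg (by simp [hx]), if_neg (by simp [← hxy.1]; exact hx)]
      exact Prod.ext hxy.1 (hxy.2 hx)
  · have hne : ∀ p ∈ r1.items, p.1 ≠ "" := by
      intro p hp he
      apply hc
      rw [PySem.Dict.contains_iff_mem_keys]
      exact List.mem_map.mpr ⟨p, hp, he⟩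
    rw [PySem.Dict.items_insert, PySem.Dict.items_insert, if_neg hc,
      if_neg (by rw [← hck]; exact hc), pvRel_eq_of_no_empty hr hne]

theorem pvLastSplit (ps : List (String × List String)) :
    (∀ p ∈ ps, p.1 ≠ "") ∨
      ∃ qs p ts, ps = qs ++ p :: ts ∧ p.1 = "" ∧ ∀ t ∈ ts, t.1 ≠ "" := by
  induction ps with
  | nil => exact Or.inl (by simp)
  | cons p ps ih =>
      rcases ih with h | ⟨qs, q, ts, heq, hq, hts⟩
      · by_cases hp : p.1 = ""
        · exact Or.inr ⟨[], p, ps, by simp, hp, h⟩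
        · exact Or.inl (by
            intro x hx
            rcases List.mem_cons.mp hx with h1 | h1
            · rw [h1]; exact hp
            · exact h x h1)
      · exact Or.inr ⟨p :: qs, q, ts, by simp [heq], hq, hts⟩

-- ========== chunk structure facts ==========

theorem pvTW_DW (l : List String) : (l.dropWhile pvNH).takeWhile pvNH = [] := by
  cases h : l.dropWhile pvNH with
  | nil => rfl
  | cons y ys =>
      have hy : pvNH y = false := by
        have := List.head_dropWhile_not pvNH (l := l) (by simp [h])
        simpa [h] using this
      simp [hy]

theorem pvChunks_wf (L : List String) :
    ∀ p ∈ pvChunks L, ∃ h b, p.2 = h :: b ∧ pvIsHeader h = true ∧ pvName h = p.1 ∧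
      ∀ x ∈ b, pvIsHeader x = false := by
  induction L using pvChunks.induct with
  | case1 => rw [pvChunks.eq_def]; simp
  | case2 l ls hh ih =>
      rw [pvChunks.eq_def]
      simp only [if_pos hh]
      intro p hp
      rcases List.mem_cons.mp hp with h1 | h1
      · subst h1
        refine ⟨l, ls.takeWhile pvNH, rfl, hh, rfl, ?_⟩
        intro x hx
        have := List.mem_takeWhile_imp hx
        simpa [pvNH] using this
      · exact ih p h1
  | case3 l ls hh ih =>
      rw [pvChunks.eq_def]
      simp only [if_neg hh]
      exact ih

theorem pvChunks_flatten (L : List String) :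
    L = L.takeWhile pvNH ++ (pvChunks L).flatMap (fun p => p.2) := by
  induction L using pvChunks.induct with
  | case1 => rw [pvChunks.eq_def]; simp
  | case2 l ls hh ih =>
      have hnh : pvNH l = false := by simp [pvNH, hh]
      rw [pvChunks.eq_def]
      simp only [if_pos hh, List.takeWhile_cons, hnh, Bool.false_eq_true, if_false,
        List.flatMap_cons, List.nil_append]
      rw [pvTW_DW] at ih
      simp only [List.nil_append] at ih
      have hsplit : ls = ls.takeWhile pvNH ++ ls.dropWhile pvNH := (List.takeWhile_append_dropWhile).symm
      calc l :: ls = l :: (ls.takeWhile pvNH ++ ls.dropWhile pvNH) := by rw [← hsplit]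
        _ = (l :: ls.takeWhile pvNH) ++ ls.dropWhile pvNH := by simp
        _ = (l :: ls.takeWhile pvNH) ++ (pvChunks (ls.dropWhile pvNH)).flatMap (fun p => p.2) :=
              congrArg (fun z => (l :: ls.takeWhile pvNH) ++ z) ih
  | case3 l ls hh ih =>
      have hnh : pvNH l = true := by simpa [pvNH] using hh
      rw [pvChunks.eq_def]
      simp only [if_neg hh, List.takeWhile_cons, hnh, if_true]
      rw [List.cons_append, ← ih]

theorem pvJoinSpace (css : List (List Char)) (h : ∀ cs ∈ css, ∀ c ∈ cs, PySem.Chars.isspace c = true)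
    (hne : css ≠ []) : ∀ c ∈ PySem.Chars.join ['\n'] css, PySem.Chars.isspace c = true := by
  induction css with
  | nil => exact absurd rfl hne
  | cons d ds ih =>
      cases ds with
      | nil =>
          rw [PySem.Chars.join_singleton]
          exact h d (by simp)
      | cons e es =>
          rw [PySem.Chars.join_cons_cons]
          intro c hc
          rcases List.mem_append.mp hc with hc1 | hc1
          · rcases List.mem_append.mp hc1 with hc2 | hc2
            · exact h d (by simp) c hc2
            · have : c = '\n' := by simpa using hc2
              rw [this]; decide
          · exact ih (fun cs hcs => h cs (by simp [hcs])) (by simp) c hc1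

theorem pvRstrip_spaces (a t : List Char) (ht : ∀ c ∈ t, PySem.Chars.isspace c = true) :
    PySem.Chars.rstrip (a ++ t) = PySem.Chars.rstrip a := by
  simp only [PySem.Chars.rstrip, List.reverse_append]
  rw [List.dropWhile_append]
  have : t.reverse.dropWhile PySem.Chars.isspace = [] := by
    rw [List.dropWhile_eq_nil_iff]
    intro x hx
    exact ht x (List.mem_reverse.mp hx)
  rw [this]
  simp

theorem pvClean (body : List String)
    (hsp : ∀ x ∈ body, ∀ c ∈ x.toList, PySem.Chars.isspace c = true) :
    pvG (":" :: body) = ":\n" := by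
  have hr : PySem.Str.rstrip (PySem.Str.join "\n" (":" :: body)) = ":" := by
    apply String.toList_inj.mp
    rw [PySem.Str.toList_rstrip, PySem.Str.toList_join]
    cases body with
    | nil =>
        simp only [List.map_cons, List.map_nil]
        rw [show (":").toList = [':'] from rfl, show ("\n").toList = ['\n'] from rfl,
          PySem.Chars.join_singleton]
        decide
    | cons x xs =>
        rw [List.map_cons, List.map_cons, show (":").toList = [':'] from rfl,
          show ("\n").toList = ['\n'] from rfl, PySem.Chars.join_cons_cons]
        have hsp' : ∀ c ∈ ['\n'] ++ PySem.Chars.join ['\n'] (x.toList :: xs.map String.toList),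
            PySem.Chars.isspace c = true := by
          intro c hc
          rcases List.mem_append.mp hc with h1 | h1
          · have : c = '\n' := by simpa using h1
            rw [this]; decide
          · refine pvJoinSpace _ ?_ (by simp) c h1
            intro cs hcs
            rcases List.mem_cons.mp hcs with h2 | h2
            · rw [h2]; exact hsp x (by simp)
            · obtain ⟨y, hy, hyeq⟩ := List.mem_map.mp h2
              rw [← hyeq]
              exact hsp y (by simp [hy])
        rw [List.append_assoc, pvRstrip_spaces [':'] _ hsp']
        decide
  rw [pvG, hr]
  decide

theorem pvA_bridge (raw : String) (ex : List String)
    (hs : ¬ PySem.Str.startswith (PySem.Str.strip raw) "# NO NEW ABILITIES" = true) :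
    extract_new_ability_blocks raw ex =
      (pvPass2 ex ((PySem.Str.splitlines raw).foldl pvStepA (PySem.Dict.empty, none)).1).items := by
  rw [extract_new_ability_blocks, if_neg hs]
  rfl

theorem pvB_bridge (raw : String) (ex : List String)
    (hs : ¬ PySem.Str.startswith (PySem.Str.strip raw) "# NO NEW ABILITIES" = true) :
    extract_new_ability_blocks_alt raw ex =
      (pvScanB ex (PySem.Str.splitlines raw) PySem.Dict.empty).items := by
  rw [extract_new_ability_blocks_alt, if_neg hs]

theorem pvF2_l1l2 (ps : List (String × List String)) :
    List.Forall₂ pvRelP (ps.map (fun p => (p.1, pvG (pvFA p)))) (ps.map (fun p => (p.1, pvG p.2))) := by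
  induction ps with
  | nil => simp
  | cons p ps ih =>
      simp only [List.map_cons]
      refine List.Forall₂.cons ⟨rfl, fun h => ?_⟩ ih
      have : pvFA p = p.2 := by simp [pvFA]; intro he; exact absurd he h
      rw [this]

theorem pvSA (ex : List String) (hm : PySem.Set.contains ex "" = true)
    {l1 l2 : List (String × String)} (hl : List.Forall₂ pvRelP l1 l2) :
    ∀ r, l1.foldl (pvStep ex) r = l2.foldl (pvStep ex) r := by
  induction hl with
  | nil => intro r; rfl
  | cons hxy hl ih =>
      rename_i a b l1' l2'
      intro r
      simp only [List.foldl_cons]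
      by_cases ha : a.1 = ""
      · have hsa : pvStep ex r a = r := by rw [pvStep, if_pos (by rw [ha]; exact hm)]
        have hsb : pvStep ex r b = r := by rw [pvStep, if_pos (by rw [← hxy.1, ha]; exact hm)]
        rw [hsa, hsb, ih]
      · have : a = b := Prod.ext hxy.1 (hxy.2 ha)
        rw [← this, ih]

theorem pvRelD_empty : pvRelD PySem.Dict.empty PySem.Dict.empty := List.Forall₂.nil

theorem pvA_red (raw : String) (ex : List String)
    (hs : ¬ PySem.Str.startswith (PySem.Str.strip raw) "# NO NEW ABILITIES" = true) :
    extract_new_ability_blocks raw ex =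
      (((pvChunks (PySem.Str.splitlines raw)).map (fun p => (p.1, pvG (pvFA p)))).foldl
        (pvStep ex) PySem.Dict.empty).items := by
  rw [pvA_bridge raw ex hs, pvPass1_chunks]
  rw [show (pvChunks (PySem.Str.splitlines raw)).foldl (fun d p => d.insert p.1 (pvFA p))
        PySem.Dict.empty =
      ((pvChunks (PySem.Str.splitlines raw)).map (fun p => (p.1, pvFA p))).foldl
        (fun d q => d.insert q.1 q.2) PySem.Dict.empty from by rw [List.foldl_map]]
  rw [pvK ex _ _ PySem.Dict.nodup_keys_empty]
  rw [show pvPass2 ex (PySem.Dict.empty : PySem.Dict String (List String)) =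
        PySem.Dict.empty from rfl]
  rw [List.foldl_map, ← List.foldl_map (f := fun p : String × List String => (p.1, pvG (pvFA p)))
    (g := pvStep ex)]

theorem pvB_red (raw : String) (ex : List String)
    (hs : ¬ PySem.Str.startswith (PySem.Str.strip raw) "# NO NEW ABILITIES" = true) :
    extract_new_ability_blocks_alt raw ex =
      (((pvChunks (PySem.Str.splitlines raw)).map (fun p => (p.1, pvG p.2))).foldl
        (pvStep ex) PySem.Dict.empty).items := by
  rw [pvB_bridge raw ex hs, pvScanB_eq_chunks,
    ← List.foldl_map (f := fun p : String × List String => (p.1, pvG p.2)) (g := pvStep ex)]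

-- lookup at key "" is unchanged by fold steps whose keys are nonempty
theorem pvGet_fold_ne (ex : List String) (l : List (String × String))
    (r : PySem.Dict String String) (h : ∀ q ∈ l, q.1 ≠ "") :
    (l.foldl (pvStep ex) r).get? "" = r.get? "" := by
  induction l generalizing r with
  | nil => rfl
  | cons q l ih =>
      simp only [List.foldl_cons]
      rw [ih _ (fun q' hq' => h q' (by simp [hq']))]
      rw [pvStep]
      split
      · rfl
      · refine PySem.Dict.get?_insert_of_ne r q.2 ?_
        intro he
        exact h q (by simp) he.symm

theorem pvMemJoin (css : List (List Char)) (cs : List Char) (c : Char)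
    (h1 : cs ∈ css) (h2 : c ∈ cs) : c ∈ PySem.Chars.join ['\n'] css := by
  induction css with
  | nil => cases h1
  | cons d ds ih =>
      cases ds with
      | nil =>
          rw [PySem.Chars.join_singleton]
          rcases List.mem_cons.mp h1 with he | he
          · rw [← he]; exact h2
          · cases he
      | cons e es =>
          rw [PySem.Chars.join_cons_cons]
          rcases List.mem_cons.mp h1 with he | he
          · exact List.mem_append_left _ (List.mem_append_left _ (he ▸ h2))
          · exact List.mem_append_right _ (ih he)

theorem pvRstripLong (s t : List Char) (c : Char) (hc : c ∈ t)
    (hcs : PySem.Chars.isspace c = false) :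
    s.length < (PySem.Chars.rstrip (s ++ t)).length := by
  simp only [PySem.Chars.rstrip, List.reverse_append]
  rw [List.dropWhile_append]
  have hne : t.reverse.dropWhile PySem.Chars.isspace ≠ [] := by
    rw [Ne, List.dropWhile_eq_nil_iff]
    intro hall
    have := hall c (List.mem_reverse.mpr hc)
    rw [hcs] at this
    exact Bool.false_ne_true this
  rw [if_neg (by simpa using hne)]
  have hpos : 0 < (t.reverse.dropWhile PySem.Chars.isspace).length :=
    List.length_pos_iff.mpr hne
  simp only [List.length_reverse, List.length_append]
  omega

theorem pvG_ne (b : List String) (x : String) (hx : x ∈ b) (c : Char) (hc : c ∈ x.toList)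
    (hcs : PySem.Chars.isspace c = false) : pvG (":" :: b) ≠ ":\n" := by
  intro he
  have hlist : (pvG (":" :: b)).toList = (":\n").toList := by rw [he]
  rw [pvG, String.toList_append, PySem.Str.toList_rstrip, PySem.Str.toList_join] at hlist
  cases b with
  | nil => cases hx
  | cons y ys =>
      rw [List.map_cons, List.map_cons, show (":").toList = [':'] from rfl,
        show ("\n").toList = ['\n'] from rfl, PySem.Chars.join_cons_cons] at hlist
      have hcJ : c ∈ PySem.Chars.join ['\n'] (y.toList :: ys.map String.toList) := by
        refine pvMemJoin _ x.toList c ?_ hc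
        rcases List.mem_cons.mp hx with he' | he'
        · rw [he']; simp
        · simp [List.mem_map.mpr ⟨x, he', rfl⟩]
      have hlong := pvRstripLong ([':'] ++ ['\n']) _ c hcJ hcs
      rw [List.append_assoc] at hlong
      have hlen := congrArg List.length hlist
      have h2 : (":\n").toList.length = 2 := by decide
      simp [h2] at hlen hlong
      omega

-- the body lines of any chunk after the last ""-chunk never contain ":"
theorem pvTWflat_nil (ts : List (String × List String))
    (hwf : ∀ t ∈ ts, ∃ h b, t.2 = h :: b ∧ pvIsHeader h = true ∧ pvName h = t.1 ∧
      ∀ x ∈ b, pvIsHeader x = false) :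
    (ts.flatMap (fun q => q.2)).takeWhile pvNH = [] := by
  cases ts with
  | nil => rfl
  | cons t ts' =>
      obtain ⟨h, b, hp2, hhdr, _, _⟩ := hwf t (by simp)
      rw [List.flatMap_cons, hp2]
      have : pvNH h = false := by simp [pvNH, hhdr]
      simp [this]

-- ===== VERDICT (by name: the statement is the Claim_ definition above) =====
set_option maxHeartbeats 2000000 in
theorem extract_new_ability_blocks_spec : Claim_unchanged_extract_new_ability_blocks := by
  intro raw ex _ hD
  by_cases hs : PySem.Str.startswith (PySem.Str.strip raw) "# NO NEW ABILITIES" = true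
  · rw [extract_new_ability_blocks, extract_new_ability_blocks_alt, if_pos hs, if_pos hs]
  · rw [pvA_red raw ex hs, pvB_red raw ex hs]
    set L := PySem.Str.splitlines raw with hL
    set ps := pvChunks L with hps
    refine congrArg PySem.Dict.items ?_
    by_cases hm : PySem.Set.contains ex "" = true
    · exact pvSA ex hm (pvF2_l1l2 ps) _
    · have hm' : "" ∉ ex := by simpa using hm
      rcases pvLastSplit ps with hclean | ⟨qs, p, ts, heq, hp, hts⟩
      · have : ps.map (fun p => (p.1, pvG (pvFA p))) = ps.map (fun p => (p.1, pvG p.2)) := by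
          apply List.map_congr_left
          intro q hq
          have hne := hclean q hq
          simp only [pvFA]
          rw [if_neg hne]
        rw [this]
      · -- last "" chunk: its body must be all-whitespace, else D_ holds
        obtain ⟨h, b, hp2, hhdr, hname, hbody⟩ := pvChunks_wf L p (by show p ∈ ps; rw [heq]; simp)
        have hhl : h = ":" := pvHeaderEmptyName h hhdr (by rw [hname, hp])
        have hspace : ∀ x ∈ b, ∀ c ∈ x.toList, PySem.Chars.isspace c = true := by
          by_contra hnc
          push_neg at hnc
          obtain ⟨x, hxb, c, hc, hcs⟩ := hnc
          apply hD
          refine ⟨by simpa using hs, hm', ?_⟩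
          rw [← hL]
          have hflat : L = L.takeWhile pvNH ++ (qs ++ p :: ts).flatMap (fun q => q.2) := by
            rw [← heq]
            exact pvChunks_flatten L
          have hflat' : L = (L.takeWhile pvNH ++ qs.flatMap (fun q => q.2)) ++
              (":" :: (b ++ ts.flatMap (fun q => q.2))) := by
            conv_lhs => rw [hflat]
            rw [List.flatMap_append, List.flatMap_cons, hp2, hhl]
            simp [List.append_assoc]
          set A1 := L.takeWhile pvNH ++ qs.flatMap (fun q => q.2) with hA1
          refine ⟨A1.length, ?_, ?_, ?_, ?_⟩
          · rw [List.mem_range]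
            rw [hflat']
            simp
          · rw [hflat', List.drop_left]
            rfl
          · rw [hflat', ← List.drop_drop, List.drop_left]
            simp only [List.drop_succ_cons, List.drop_zero]
            intro hmem
            rcases List.mem_append.mp hmem with h1 | h1
            · have hbx := hbody _ h1
              have hcol : pvIsHeader ":" = true := by decide
              rw [hbx] at hcol
              exact Bool.false_ne_true hcol
            · obtain ⟨t, ht, hmt⟩ := List.mem_flatMap.mp h1
              obtain ⟨ht', bt', hpt2, hthdr, htname, htbody⟩ :=
                pvChunks_wf L t (by show t ∈ ps; rw [heq]; simp [ht])
              rw [hpt2] at hmt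
              rcases List.mem_cons.mp hmt with h2 | h2
              · have hcol : pvName ":" = "" := by decide
                rw [← h2] at htname
                exact hts t ht (by rw [← htname, hcol])
              · have hbx := htbody _ h2
                have hcol : pvIsHeader ":" = true := by decide
                rw [hbx] at hcol
                exact Bool.false_ne_true hcol
          · rw [hflat', ← List.drop_drop, List.drop_left]
            simp only [List.drop_succ_cons, List.drop_zero]
            refine ⟨x, ?_, ?_⟩
            · have hbnh : ∀ y ∈ b, pvNH y = true := by
                intro y hy
                simp [pvNH, hbody y hy]
              rw [show (fun y => !pvIsHeader y) = pvNH from rfl]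
              rw [List.takeWhile_append, if_pos (by rw [List.takeWhile_eq_self_iff.mpr hbnh])]
              exact List.mem_append_left _ hxb
            · rw [List.any_eq_true]
              exact ⟨c, hc, by simp [hcs]⟩
        have hval : pvG p.2 = ":\n" := by rw [hp2, hhl]; exact pvClean b hspace
        have hvalA : pvG (pvFA p) = ":\n" := by rw [pvFA, if_pos hp]; decide
        rw [heq]
        simp only [List.map_append, List.map_cons, hp, hval, hvalA]
        rw [List.foldl_append, List.foldl_append, List.foldl_cons, List.foldl_cons]
        have hrel : pvRelD ((qs.map (fun p => (p.1, pvG (pvFA p)))).foldl (pvStep ex) PySem.Dict.empty)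
            ((qs.map (fun p => (p.1, pvG p.2))).foldl (pvStep ex) PySem.Dict.empty) :=
          pvRel_fold ex (pvF2_l1l2 qs) pvRelD_empty
        rw [show ∀ r : PySem.Dict String String, pvStep ex r ("", ":\n") = r.insert "" ":\n" from
          fun r => by rw [pvStep, if_neg hm]]
        rw [pvRel_insert_empty hrel ":\n"]
        have hmaps : ts.map (fun p => (p.1, pvG (pvFA p))) = ts.map (fun p => (p.1, pvG p.2)) := by
          apply List.map_congr_left
          intro t ht
          have hne := hts t ht
          simp only [pvFA]
          rw [if_neg hne]
        rw [hmaps]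
        rw [pvStep, if_neg hm]

theorem extract_new_ability_blocks_changed : Claim_changed_extract_new_ability_blocks := by
  unfold Claim_changed_extract_new_ability_blocks
  refine ⟨by decide, by decide, by decide, ?_, by decide⟩
  show extract_new_ability_blocks_alt ":\nx" [] = [("", ":\nx\n")]
  rw [extract_new_ability_blocks_alt, if_neg (by decide),
    show PySem.Str.splitlines ":\nx" = [":", "x"] from by decide]
  rw [pvScanB.eq_def]
  simp only []
  rw [if_pos (by decide)]
  simp only [List.takeWhile, List.dropWhile]
  norm_num [pvIsHeader]
  rw [pvScanB.eq_def]
  decide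

set_option maxHeartbeats 2000000 in
theorem extract_new_ability_blocks_tight : Claim_exact_extract_new_ability_blocks := by
  intro raw ex _ hD
  obtain ⟨hsent, hmem', i, hiR, hihead, hino, x', hx'tw, hx'any⟩ := hD
  have hs : ¬ PySem.Str.startswith (PySem.Str.strip raw) "# NO NEW ABILITIES" = true :=
    fun hcontra => Bool.false_ne_true (hsent.symm.trans hcontra)
  rw [pvA_red raw ex hs, pvB_red raw ex hs]
  set L := PySem.Str.splitlines raw with hL
  set ps := pvChunks L with hps
  have hheadL : L[i]? = some ":" := by rw [← List.head?_drop]; exact hihead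
  have hmemL : ":" ∈ L := List.mem_of_getElem? hheadL
  have hm : PySem.Set.contains ex "" = false := by simp [hmem']
  have hexists : ∃ t ∈ ps, t.1 = "" := by
    rw [pvChunks_flatten L] at hmemL
    rcases List.mem_append.mp hmemL with hpre | hfl
    · have h1 := List.mem_takeWhile_imp hpre
      have h2 : pvIsHeader ":" = true := by decide
      rw [show pvNH ":" = !pvIsHeader ":" from rfl, h2] at h1
      simp at h1
    · obtain ⟨t, ht, hmt⟩ := List.mem_flatMap.mp hfl
      obtain ⟨h', b', hp2', hhdr', hname', hbody'⟩ := pvChunks_wf L t ht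
      rw [hp2'] at hmt
      rcases List.mem_cons.mp hmt with h2 | h2
      · refine ⟨t, ht, ?_⟩
        rw [← hname', ← h2]
        decide
      · have hbx := hbody' _ h2
        have hcol : pvIsHeader ":" = true := by decide
        rw [hbx] at hcol
        exact absurd hcol Bool.false_ne_true
  rcases pvLastSplit ps with hclean | ⟨qs, p, ts, heq, hp, hts⟩
  · obtain ⟨t, ht, ht1⟩ := hexists
    exact absurd ht1 (hclean t ht)
  · obtain ⟨h, b, hp2, hhdr, hname, hbody⟩ := pvChunks_wf L p (by show p ∈ ps; rw [heq]; simp)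
    have hhl : h = ":" := pvHeaderEmptyName h hhdr (by rw [hname, hp])
    have hwfts : ∀ t ∈ ts, ∃ h b, t.2 = h :: b ∧ pvIsHeader h = true ∧ pvName h = t.1 ∧
        ∀ x ∈ b, pvIsHeader x = false := by
      intro t ht
      exact pvChunks_wf L t (by show t ∈ ps; rw [heq]; simp [ht])
    have hflat : L = L.takeWhile pvNH ++ (qs ++ p :: ts).flatMap (fun q => q.2) := by
      rw [← heq]
      exact pvChunks_flatten L
    have hflat' : L = (L.takeWhile pvNH ++ qs.flatMap (fun q => q.2)) ++
        (":" :: (b ++ ts.flatMap (fun q => q.2))) := by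
      conv_lhs => rw [hflat]
      rw [List.flatMap_append, List.flatMap_cons, hp2, hhl]
      simp [List.append_assoc]
    set A1 := L.takeWhile pvNH ++ qs.flatMap (fun q => q.2) with hA1
    have hnoR : ":" ∉ b ++ ts.flatMap (fun q => q.2) := by
      intro hmem
      rcases List.mem_append.mp hmem with h1 | h1
      · have hbx := hbody _ h1
        have hcol : pvIsHeader ":" = true := by decide
        rw [hbx] at hcol
        exact Bool.false_ne_true hcol
      · obtain ⟨t, ht, hmt⟩ := List.mem_flatMap.mp h1
        obtain ⟨ht', bt', hpt2, hthdr, htname, htbody⟩ := hwfts t ht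
        rw [hpt2] at hmt
        rcases List.mem_cons.mp hmt with h2 | h2
        · have hcol : pvName ":" = "" := by decide
          rw [← h2] at htname
          exact hts t ht (by rw [← htname, hcol])
        · have hbx := htbody _ h2
          have hcol : pvIsHeader ":" = true := by decide
          rw [hbx] at hcol
          exact Bool.false_ne_true hcol
    have hposA1 : L[A1.length]? = some ":" := by
      rw [← List.head?_drop]
      conv_lhs => rw [hflat']
      rw [List.drop_left]
      rfl
    have hiEq : i = A1.length := by
      rcases Nat.lt_trichotomy i A1.length with hlt | heqi | hgt
      · exfalso
        apply hino
        have hge : (L.drop (i+1))[A1.length - (i+1)]? = some ":" := by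
          rw [List.getElem?_drop, show i + 1 + (A1.length - (i+1)) = A1.length from by omega,
            hposA1]
        exact List.mem_of_getElem? hge
      · exact heqi
      · exfalso
        apply hnoR
        have hdropR : L.drop (A1.length+1) = b ++ ts.flatMap (fun q => q.2) := by
          conv_lhs => rw [hflat']
          rw [← List.drop_drop, List.drop_left]
          simp
        have hge : (L.drop (A1.length+1))[i - (A1.length+1)]? = some ":" := by
          rw [List.getElem?_drop, show A1.length + 1 + (i - (A1.length+1)) = i from by omega,
            hheadL]
        rw [hdropR] at hge
        exact List.mem_of_getElem? hge
    have hdropR : L.drop (i+1) = b ++ ts.flatMap (fun q => q.2) := by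
      rw [hiEq]
      conv_lhs => rw [hflat']
      rw [← List.drop_drop, List.drop_left]
      simp
    rw [hdropR] at hx'tw
    have hbnh : ∀ y ∈ b, pvNH y = true := by
      intro y hy
      simp [pvNH, hbody y hy]
    rw [show (fun y => !pvIsHeader y) = pvNH from rfl] at hx'tw
    rw [List.takeWhile_append, if_pos (by rw [List.takeWhile_eq_self_iff.mpr hbnh]),
      pvTWflat_nil ts hwfts] at hx'tw
    have hx'b : x' ∈ b := by simpa using hx'tw
    obtain ⟨c, hc, hcany⟩ := List.any_eq_true.mp hx'any
    have hcs : PySem.Chars.isspace c = false := by simpa using hcany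
    have hvalA : pvG (pvFA p) = ":\n" := by rw [pvFA, if_pos hp]; decide
    intro heqAB
    have hdicts :
        ((ps.map (fun p => (p.1, pvG (pvFA p)))).foldl (pvStep ex) PySem.Dict.empty) =
        ((ps.map (fun p => (p.1, pvG p.2))).foldl (pvStep ex) PySem.Dict.empty) :=
      PySem.Dict.ext heqAB
    rw [heq] at hdicts
    simp only [List.map_append, List.map_cons, hp] at hdicts
    rw [List.foldl_append, List.foldl_append, List.foldl_cons, List.foldl_cons] at hdicts
    rw [show ∀ r : PySem.Dict String String, ∀ w : String, pvStep ex r ("", w) = r.insert "" w from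
      fun r w => by
        rw [pvStep, if_neg (fun hcontra => Bool.false_ne_true (hm.symm.trans hcontra))]] at hdicts
    rw [show ∀ r : PySem.Dict String String, ∀ w : String, pvStep ex r ("", w) = r.insert "" w from
      fun r w => by
        rw [pvStep, if_neg (fun hcontra => Bool.false_ne_true (hm.symm.trans hcontra))]] at hdicts
    have hgA := pvGet_fold_ne ex (ts.map (fun p => (p.1, pvG (pvFA p))))
      (((qs.map (fun p => (p.1, pvG (pvFA p)))).foldl (pvStep ex) PySem.Dict.empty).insert ""
        (pvG (pvFA p))) (by
      intro q hq
      obtain ⟨t, ht, rfl⟩ := List.mem_map.mp hq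
      exact hts t ht)
    have hgB := pvGet_fold_ne ex (ts.map (fun p => (p.1, pvG p.2)))
      (((qs.map (fun p => (p.1, pvG p.2))).foldl (pvStep ex) PySem.Dict.empty).insert ""
        (pvG p.2)) (by
      intro q hq
      obtain ⟨t, ht, rfl⟩ := List.mem_map.mp hq
      exact hts t ht)
    have hget := congrArg (fun d => PySem.Dict.get? d "") hdicts
    simp only at hget
    rw [hgA, hgB, PySem.Dict.get?_insert_self, PySem.Dict.get?_insert_self, hvalA] at hget
    have hv : (":\n" : String) = pvG p.2 := Option.some.inj hget
    refine pvG_ne b x' hx'b c hc hcs ?_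
    rw [hp2, hhl] at hv
    exact hv.symm
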